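-- pv_equiv track=rewrite | github.com/EliezxRTS/DyAA-1561_2025-I | Tarea10/RyP_Manhattan.py | buscar_entrada
-- ===== SOURCE A (Python) =====
-- def buscar_entrada(laberinto, entrada, salida):
--     entrada_x_y = None
--     salida_x_y = None
--     for x in range(len(laberinto)):
--         for y in range(len(laberinto[x])):
--             if laberinto[x][y] == entrada:
--                 entrada_x_y = [x, y]
--             if laberinto[x][y] == salida:
--                 salida_x_y = [x, y]
--     return entrada_x_y, salida_x_y
-- ===== SOURCE B (Python) =====
-- def buscar_entrada(laberinto, entrada, salida):
--     # Two staged per-value searches: a shared helper finds the last occurrence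
--     # of one value using membership tests and reversed-row .index, instead of
--     # one nested scan carrying two accumulators.
--     return _ultima_posicion(laberinto, entrada), _ultima_posicion(laberinto, salida)
--
-- def _ultima_posicion(laberinto, valor):
--     for x in range(len(laberinto) - 1, -1, -1):
--         fila = laberinto[x]
--         if valor in fila:
--             return [x, len(fila) - 1 - fila[::-1].index(valor)]
--     return None
-- ===== Notes on version B (the rewrite author's own statement) =====
-- stated objective: alternative
-- what changed: B replaces A's single nested scan with two accumulators by two staged per-value searches through a shared helper that, scanning rows from the last, uses a membership test and reversed-row .index to return the last occurrence directly.
import Mathlib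
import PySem

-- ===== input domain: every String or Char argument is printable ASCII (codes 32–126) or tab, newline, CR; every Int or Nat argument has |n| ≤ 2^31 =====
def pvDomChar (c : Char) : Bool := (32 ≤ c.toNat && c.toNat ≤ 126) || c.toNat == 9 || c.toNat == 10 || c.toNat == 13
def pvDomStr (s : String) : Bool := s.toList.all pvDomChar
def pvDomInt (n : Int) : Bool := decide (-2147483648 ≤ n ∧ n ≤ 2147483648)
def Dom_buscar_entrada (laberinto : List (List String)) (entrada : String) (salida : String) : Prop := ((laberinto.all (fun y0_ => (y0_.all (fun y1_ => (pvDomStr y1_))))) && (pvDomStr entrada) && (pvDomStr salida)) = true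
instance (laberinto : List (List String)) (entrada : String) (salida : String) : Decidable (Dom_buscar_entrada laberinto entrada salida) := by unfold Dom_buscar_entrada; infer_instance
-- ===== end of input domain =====

-- B: two staged per-value searches (membership test + reversed-row index) instead of
-- A's nested scan with two accumulators; same return value.

-- ===== PORT A =====
-- A: full forward scan, later matches overwrite earlier ones.
def buscar_entrada (laberinto : List (List String)) (entrada : String) (salida : String) : Option (List Int) × Option (List Int) :=
  laberinto.zipIdx.foldl
    (fun st rx =>
      rx.1.zipIdx.foldl
        (fun st vy =>
          let st := if vy.1 == entrada then (some [(rx.2 : Int), (vy.2 : Int)], st.2) else st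
          if vy.1 == salida then (st.1, some [(rx.2 : Int), (vy.2 : Int)]) else st)
        st)
    (none, none)

-- ===== PORT B =====
-- helper _ultima_posicion: rows from the last; a membership test, then the
-- reversed row's .index gives the last column (guarded, so .index cannot raise;
-- the .getD 0 is never reached).
def pvUltima (valor : String) : List (List String × Nat) → Option (List Int)
  | [] => none
  | (fila, x) :: rest =>
    if fila.contains valor then
      some [(x : Int), (fila.length : Int) - 1 - (((PySem.List.index? fila.reverse valor).getD 0 : Nat) : Int)]
    else pvUltima valor rest

def buscar_entrada_alt (laberinto : List (List String)) (entrada : String) (salida : String) : Option (List Int) × Option (List Int) :=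
  (pvUltima entrada laberinto.zipIdx.reverse, pvUltima salida laberinto.zipIdx.reverse)

-- ===== PRECONDITION & SPEC =====
def Spec_buscar_entrada (laberinto : List (List String)) (entrada : String) (salida : String) (out : Option (List Int) × Option (List Int)) : Prop := out = buscar_entrada_alt laberinto entrada salida
instance (laberinto : List (List String)) (entrada : String) (salida : String) (out : Option (List Int) × Option (List Int)) : Decidable (Spec_buscar_entrada laberinto entrada salida out) := by unfold Spec_buscar_entrada; infer_instance

-- ===== CLAIM (what is proved, stated in full; the proofs are below) =====
def Claim_equal_buscar_entrada : Prop := ∀ (laberinto : List (List String)) (entrada : String) (salida : String), Dom_buscar_entrada laberinto entrada salida → Spec_buscar_entrada laberinto entrada salida (buscar_entrada laberinto entrada salida)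

-- ===== LEMMAS AND PROOFS =====

-- first match of value e in an (already ordered) list of (value, column) pairs of row x
def rowHit (e : String) (x : Nat) (l : List (String × Nat)) : Option (List Int) :=
  (l.find? (fun p => p.1 == e)).map (fun p => [(x : Int), (p.2 : Int)])

-- first row (in the given order) producing a hit
def gridHit (e : String) (rows : List (List String × Nat)) : Option (List Int) :=
  rows.findSome? (fun rx => rowHit e rx.2 rx.1.zipIdx.reverse)

-- closed form for A's inner foldl
theorem innerA_eq (e s : String) (x : Nat) (l : List (String × Nat))
    (st : Option (List Int) × Option (List Int)) :
    l.foldl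
      (fun st vy =>
        let st := if vy.1 == e then (some [(x : Int), (vy.2 : Int)], st.2) else st
        if vy.1 == s then (st.1, some [(x : Int), (vy.2 : Int)]) else st)
      st
    = ((rowHit e x l.reverse).or st.1, (rowHit s x l.reverse).or st.2) := by
  induction l generalizing st with
  | nil => simp [rowHit]
  | cons h t ih =>
    simp only [List.foldl_cons, ih]
    have hrev : (h :: t).reverse = t.reverse ++ [h] := by simp
    rw [hrev]
    simp only [rowHit, List.find?_append, Option.map_or]
    by_cases he : h.1 == e <;> by_cases hs : h.1 == s <;>
      simp [he, hs, Option.or_none, List.find?]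

-- closed form for A's outer foldl
theorem outerA_eq (e s : String) (rows : List (List String × Nat))
    (st : Option (List Int) × Option (List Int)) :
    rows.foldl
      (fun st rx =>
        rx.1.zipIdx.foldl
          (fun st vy =>
            let st := if vy.1 == e then (some [(rx.2 : Int), (vy.2 : Int)], st.2) else st
            if vy.1 == s then (st.1, some [(rx.2 : Int), (vy.2 : Int)]) else st)
          st)
      st
    = ((gridHit e rows.reverse).or st.1, (gridHit s rows.reverse).or st.2) := by
  induction rows generalizing st with
  | nil => simp [gridHit]
  | cons h t ih =>
    rw [List.foldl_cons, innerA_eq, ih]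
    have hrev : (h :: t).reverse = t.reverse ++ [h] := by simp
    rw [hrev]
    simp only [gridHit, List.findSome?_append]
    cases hce : rowHit e h.2 h.1.zipIdx.reverse <;> cases hcs : rowHit s h.2 h.1.zipIdx.reverse <;>
      simp [hce, hcs, Option.or_none, List.findSome?]

-- the reverse row hit computes exactly B's membership-plus-reverse-index expression
theorem rowHit_eq (e : String) (x : Nat) (fila : List String) :
    rowHit e x fila.zipIdx.reverse
      = if fila.contains e then
          some [(x : Int), (fila.length : Int) - 1 - (((PySem.List.index? fila.reverse e).getD 0 : Nat) : Int)]
        else none := by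
  induction fila using List.reverseRecOn with
  | nil => simp [rowHit]
  | append_singleton l a ih =>
    rw [List.zipIdx_append]
    simp only [List.reverse_append, List.reverse_cons]
    by_cases ha : a = e
    · subst ha
      simp [rowHit, PySem.List.index?, List.idxOf?_cons]
    · have hne : (a == e) = false := by simp [ha]
      simp only [List.zipIdx_cons, List.zipIdx_nil, List.reverse_nil, List.nil_append,
        List.reverse_singleton, List.singleton_append]
      rw [rowHit]
      simp only [List.find?_cons, hne]
      rw [← rowHit, ih, PySem.List.index?_cons_of_ne l.reverse ha]
      cases hix : PySem.List.index? l.reverse e with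
      | none =>
        have hnm : e ∉ l := by
          have := (PySem.List.index?_eq_none_iff (xs := l.reverse) (v := e)).mp hix
          simpa using this
        simp [hnm, Ne.symm ha]
      | some k =>
        have hm : e ∈ l := by
          have := (PySem.List.index?_isSome_iff (xs := l.reverse) (v := e)).mp (by rw [hix]; rfl)
          simpa using this
        simp only [List.contains_append]
        simp [hm]
        ring

-- B's helper is the first row hit in the given order
theorem pvUltima_eq (e : String) (rows : List (List String × Nat)) :
    pvUltima e rows = gridHit e rows := by
  induction rows with
  | nil => simp [pvUltima, gridHit]
  | cons h t ih =>
    obtain ⟨fila, x⟩ := h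
    rw [pvUltima]
    simp only [gridHit, List.findSome?_cons]
    rw [rowHit_eq]
    by_cases hc : e ∈ fila <;> simp [hc, ih, gridHit]

-- ===== VERDICT (by name: the statement is the Claim_ definition above) =====
theorem buscar_entrada_spec : Claim_equal_buscar_entrada := by
  intro lab e s _
  show buscar_entrada lab e s = buscar_entrada_alt lab e s
  rw [buscar_entrada, buscar_entrada_alt, outerA_eq, pvUltima_eq, pvUltima_eq]
  simp
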